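-- pv_equiv track=rewrite | github.com/dudamarlena/pyc_source | pycfiles/sfm-0.0.17-py2.py3-none-any/textformatter.py | format_person_name
-- ===== SOURCE A (Python) =====
-- def format_person_name(text):
--     u"""Capitalize first letter for each part of the name.
--
--     Example::
--
--         person_name = "James Bond"
--
--     **中文文档**
--
--     将文本修改为人名格式。每个单词的第一个字母大写。
--     """
--     text = text.strip()
--     if len(text) == 0:
--         return text
--     else:
--         text = text.lower()
--         words = [ word for word in text.strip().split(' ') if len(word) >= 1 ]
--         words = [ word[0].upper() + word[1:] for word in words ]
--         return (' ').join(words)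
-- ===== SOURCE B (Python) =====
-- def format_person_name(text):
--     """Capitalize first letter for each part of the name (single stateful pass)."""
--     text = text.strip()
--     if len(text) == 0:
--         return text
--     text = text.lower()
--     out = []
--     new_word = True
--     for c in text:
--         if c == ' ':
--             new_word = True
--         else:
--             if out and new_word:
--                 out.append(' ')
--             out.append(c.upper() if new_word else c)
--             new_word = False
--     return ''.join(out)
-- ===== Notes on version B (the rewrite author's own statement) =====
-- stated objective: alternative
-- what changed: Replaces the split/filter/capitalize/join pipeline with a single stateful character-by-character pass that collapses runs of the space separator and uppercases the first letter of each word on the fly.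
import Mathlib
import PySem

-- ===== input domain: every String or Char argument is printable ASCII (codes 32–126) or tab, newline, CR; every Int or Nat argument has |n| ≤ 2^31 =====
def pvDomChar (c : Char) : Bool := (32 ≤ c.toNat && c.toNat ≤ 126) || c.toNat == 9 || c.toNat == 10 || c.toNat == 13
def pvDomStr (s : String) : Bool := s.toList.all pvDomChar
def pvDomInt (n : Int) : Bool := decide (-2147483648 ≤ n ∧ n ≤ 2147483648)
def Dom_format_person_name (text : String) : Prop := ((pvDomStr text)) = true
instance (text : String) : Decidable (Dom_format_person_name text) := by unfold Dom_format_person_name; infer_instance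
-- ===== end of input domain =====

-- B replaces A's split/filter/capitalize/join pipeline with one stateful pass over the characters (objective: alternative decomposition, same cost).

-- ===== PORT A =====
-- word[0].upper() + word[1:]; the [] branch is unreachable in A (words are filtered nonempty)
def capWordA (w : List Char) : List Char :=
  match w with
  | [] => []
  | c :: rest => PySem.Chars.upperChar c :: rest

def format_person_name (text : String) : String :=
  let t := PySem.Str.strip text
  if PySem.Str.len t = 0 then t
  else
    let t2 := PySem.Str.lower t
    let words := (PySem.Chars.splitOn (PySem.Str.strip t2).toList [' ']).filter
        (fun w => decide (1 ≤ PySem.Chars.len w))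
    String.ofList (PySem.Chars.join [' '] (words.map capWordA))

-- ===== PORT B =====
def format_person_name_alt (text : String) : String :=
  let t := PySem.Str.strip text
  if PySem.Str.len t = 0 then t
  else
    let t2 := PySem.Str.lower t
    let res := t2.toList.foldl
      (fun (st : List Char × Bool) c =>
        if c = ' ' then (st.1, true)
        else (st.1 ++ (if !st.1.isEmpty && st.2 then [' '] else [])
                   ++ [if st.2 then PySem.Chars.upperChar c else c], false))
      ([], true)
    String.ofList res.1

-- ===== PRECONDITION & SPEC =====
def Spec_format_person_name (text : String) (out : String) : Prop := out = format_person_name_alt text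
instance (text : String) (out : String) : Decidable (Spec_format_person_name text out) := by unfold Spec_format_person_name; infer_instance

-- ===== CLAIM (what is proved, stated in full; the proofs are below) =====
def Claim_equal_format_person_name : Prop := ∀ (text : String), Dom_format_person_name text → Spec_format_person_name text (format_person_name text)

-- ===== LEMMAS AND PROOFS =====

-- canonical space-split with an accumulated current word (characterises A's splitOn)
def wsplit (cur : List Char) : List Char → List (List Char)
  | [] => [cur]
  | c :: r => if c = ' ' then cur :: wsplit [] r else wsplit (cur ++ [c]) r

-- what B's loop emits after the first word has started: inWord = (new_word is false)
def trail : Bool → List Char → List Char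
  | _, [] => []
  | inWord, c :: r =>
      if c = ' ' then trail false r
      else if inWord then c :: trail true r
      else ' ' :: PySem.Chars.upperChar c :: trail true r

def stepB : List Char × Bool → Char → List Char × Bool :=
  fun st c =>
    if c = ' ' then (st.1, true)
    else (st.1 ++ (if !st.1.isEmpty && st.2 then [' '] else [])
               ++ [if st.2 then PySem.Chars.upperChar c else c], false)

def renderJ (ws : List (List Char)) : List Char :=
  PySem.Chars.join [' '] (ws.map capWordA)

theorem wsplit_head_ne {cur : List Char} (r : List Char) (h : cur ≠ []) :
    ∃ w ws, wsplit cur r = w :: ws ∧ w ≠ [] := by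
  induction r generalizing cur with
  | nil => exact ⟨cur, [], rfl, h⟩
  | cons c t ih =>
      by_cases hc : c = ' '
      · exact ⟨cur, wsplit [] t, by simp [wsplit, hc], h⟩
      · obtain ⟨w, ws, hw, hne⟩ := ih (cur := cur ++ [c]) (by simp)
        exact ⟨w, ws, by simp [wsplit, hc, hw], hne⟩

theorem capWordA_append (cur : List Char) (c : Char) (h : cur ≠ []) :
    capWordA (cur ++ [c]) = capWordA cur ++ [c] := by
  cases cur with
  | nil => exact absurd rfl h
  | cons a t => simp [capWordA]

theorem trail_render (r : List Char) :
    (∀ cur, cur ≠ [] →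
      capWordA cur ++ trail true r = renderJ ((wsplit cur r).filter (fun w => !w.isEmpty))) ∧
    (∀ cur, cur ≠ [] →
      capWordA cur ++ trail false r = renderJ (cur :: (wsplit [] r).filter (fun w => !w.isEmpty))) := by
  induction r with
  | nil =>
      constructor <;> intro cur h <;>
        simp [trail, wsplit, renderJ, PySem.Chars.join_singleton,
              List.isEmpty_eq_false_iff, h]
  | cons c t ih =>
      constructor
      · intro cur h
        by_cases hc : c = ' '
        · have := ih.2 cur h
          simp [trail, wsplit, hc, renderJ, h] at this ⊢
          simpa [renderJ] using this
        · have := ih.1 (cur ++ [c]) (by simp)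
          simp [trail, wsplit, hc, capWordA_append cur c h] at this ⊢
          simpa [renderJ] using this
      · intro cur h
        by_cases hc : c = ' '
        · have := ih.2 cur h
          simp [trail, wsplit, hc] at this ⊢
          simpa [renderJ] using this
        · obtain ⟨w, ws, hw, hne⟩ := wsplit_head_ne (cur := [c]) t (by simp)
          have h1 := ih.1 [c] (by simp)
          simp [trail, wsplit, hc, hw] at h1 ⊢
          simp [renderJ, hne, PySem.Chars.join_cons_cons] at h1 ⊢
          simpa [capWordA] using h1
  
theorem foldl_stepB (cs : List Char) :
    ∀ out nw, out ≠ [] →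
      (cs.foldl stepB (out, nw)).1 = out ++ trail (!nw) cs := by
  induction cs with
  | nil => intro out nw h; simp [trail]
  | cons c t ih =>
      intro out nw h
      by_cases hc : c = ' '
      · simp [stepB, hc, trail, ih out true h]
      · cases nw with
        | false =>
            simp [stepB, hc, trail, ih (out ++ [c]) false (by simp)]
        | true =>
            simp [stepB, hc, trail, List.isEmpty_eq_false_iff, h,
                  ih (out ++ [' ', PySem.Chars.upperChar c]) false (by simp)]

theorem lead_render (cs : List Char) :
    (cs.foldl stepB ([], true)).1 = renderJ ((wsplit [] cs).filter (fun w => !w.isEmpty)) := by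
  induction cs with
  | nil => simp [renderJ, wsplit, PySem.Chars.join_nil]
  | cons c t ih =>
      by_cases hc : c = ' '
      · simpa [stepB, hc, wsplit] using ih
      · have hf := foldl_stepB t [PySem.Chars.upperChar c] false (by simp)
        have hr := (trail_render t).1 [c] (by simp)
        simp [stepB, hc, wsplit] at hf ⊢
        rw [hf]
        simpa [capWordA] using hr

theorem splitOn_go_wsplit (l : List Char) :
    ∀ fuel cur acc, l.length ≤ fuel →
      PySem.Chars.splitOn.go [' '] fuel l cur acc = acc.reverse ++ wsplit cur.reverse l := by
  induction l with
  | nil =>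
      intro fuel cur acc _
      cases fuel <;> simp [PySem.Chars.splitOn.go, wsplit]
  | cons c t ih =>
      intro fuel cur acc hf
      cases fuel with
      | zero => simp at hf
      | succ f =>
          by_cases hc : c = ' '
          · rw [PySem.Chars.splitOn.go]
            simp [List.isPrefixOf, hc, wsplit, ih f [] (cur.reverse :: acc) (by simpa using hf)]
          · rw [PySem.Chars.splitOn.go]
            simp [List.isPrefixOf, hc, wsplit,
                  ih f (c :: cur) acc (by simpa using Nat.le_of_succ_le_succ hf)]
            simp [Ne.symm hc]

theorem splitOn_eq_wsplit (cs : List Char) :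
    PySem.Chars.splitOn cs [' '] = wsplit [] cs := by
  simpa using splitOn_go_wsplit cs (cs.length + 1) [] [] (by omega)

theorem isspace_lowerChar (c : Char) :
    PySem.Chars.isspace (PySem.Chars.lowerChar c) = PySem.Chars.isspace c := by
  unfold PySem.Chars.lowerChar
  by_cases h : PySem.Chars.isupper c = true
  · have hb' : ('A' ≤ c) ∧ (c ≤ 'Z') := by simpa [PySem.Chars.isupper] using h
    have hb : 65 ≤ c.toNat ∧ c.toNat ≤ 90 := ⟨hb'.1, hb'.2⟩
    have hv : (Char.ofNat (c.toNat + 32)).toNat = c.toNat + 32 := by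
      rw [Char.toNat_ofNat, if_pos]
      exact Or.inl (by omega)
    have h1 : PySem.Chars.isspace (Char.ofNat (c.toNat + 32)) = false := by
      simp [PySem.Chars.isspace, hv]; omega
    have h2 : PySem.Chars.isspace c = false := by
      simp [PySem.Chars.isspace]; omega
    simp [h, h1, h2]
  · simp [h]

theorem dropWhile_head_false {p : Char → Bool} {l ys : List Char} {c : Char}
    (h : List.dropWhile p l = c :: ys) : p c = false := by
  have hne : List.dropWhile p l ≠ [] := by simp [h]
  have := List.head_dropWhile_not p hne
  simpa [h] using this

theorem lstrip_rstrip_lstrip (l : List Char) :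
    PySem.Chars.lstrip (PySem.Chars.rstrip (PySem.Chars.lstrip l)) =
      PySem.Chars.rstrip (PySem.Chars.lstrip l) := by
  unfold PySem.Chars.lstrip PySem.Chars.rstrip
  cases hY : List.dropWhile PySem.Chars.isspace l with
  | nil => simp
  | cons c ys =>
      have hc : PySem.Chars.isspace c = false := dropWhile_head_false hY
      have hpre : (List.dropWhile PySem.Chars.isspace (c :: ys).reverse).reverse <+: c :: ys := by
        have h1 := (List.dropWhile_suffix (l := (c :: ys).reverse) PySem.Chars.isspace).reverse
        rwa [List.reverse_reverse] at h1
      rcases List.prefix_cons_iff.mp hpre with hnil | ⟨t, ht, -⟩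
      · rw [hnil, List.dropWhile_nil]
      · rw [ht, List.dropWhile_cons, hc]
        simp

theorem strip_strip (l : List Char) :
    PySem.Chars.strip (PySem.Chars.strip l) = PySem.Chars.strip l := by
  unfold PySem.Chars.strip
  rw [lstrip_rstrip_lstrip]
  unfold PySem.Chars.rstrip
  simp [List.dropWhile_idempotent]

theorem lower_strip_comm (l : List Char) :
    PySem.Chars.strip (PySem.Chars.lower l) = PySem.Chars.lower (PySem.Chars.strip l) := by
  have hdw : ∀ m : List Char,
      List.dropWhile PySem.Chars.isspace (m.map PySem.Chars.lowerChar) =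
        (List.dropWhile PySem.Chars.isspace m).map PySem.Chars.lowerChar := by
    intro m
    have hfun : PySem.Chars.isspace ∘ PySem.Chars.lowerChar = PySem.Chars.isspace :=
      funext fun c => isspace_lowerChar c
    rw [List.dropWhile_map, hfun]
  unfold PySem.Chars.strip PySem.Chars.lstrip PySem.Chars.rstrip PySem.Chars.lower
  rw [hdw]
  rw [← List.map_reverse, hdw, List.map_reverse]

theorem strip_lower_strip (l : List Char) :
    PySem.Chars.strip (PySem.Chars.lower (PySem.Chars.strip l)) =
      PySem.Chars.lower (PySem.Chars.strip l) := by
  rw [← lower_strip_comm, strip_strip, lower_strip_comm]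

theorem filterPred_eq (w : List Char) :
    (decide (1 ≤ PySem.Chars.len w)) = !w.isEmpty := by
  cases w <;> simp [PySem.Chars.len]

-- ===== VERDICT (by name: the statement is the Claim_ definition above) =====
theorem format_person_name_spec : Claim_equal_format_person_name := by
  intro text _
  unfold Spec_format_person_name format_person_name format_person_name_alt
  have hlen0 : PySem.Str.len (PySem.Str.strip text) = 0 ↔ PySem.Chars.strip text.toList = [] := by
    rw [PySem.Str.len]
    rw [show (PySem.Str.strip text).toList = PySem.Chars.strip text.toList from PySem.Str.toList_strip text]
    simp [List.length_eq_zero_iff]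
  by_cases h0 : PySem.Str.len (PySem.Str.strip text) = 0
  · simp [hlen0.mp h0]
  · simp only [h0, if_false]
    refine congrArg String.ofList ?_
    have hlist : (PySem.Str.strip (PySem.Str.lower (PySem.Str.strip text))).toList =
        (PySem.Str.lower (PySem.Str.strip text)).toList := by
      simp only [PySem.Str.toList_strip, PySem.Str.toList_lower]
      exact strip_lower_strip text.toList
    rw [hlist, splitOn_eq_wsplit]
    rw [List.filter_congr (fun w _ => filterPred_eq w)]
    rw [← renderJ, ← lead_render]
    rfl
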